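-- pv_equiv track=rewrite | github.com/WangEdward/advent_of_code | advent_of_code/2023/13/two.py | solve
-- ===== SOURCE A (Python) =====
-- def verify(a, b):
--     count = 0
--     for i in range(min(len(a), len(b))):
--         if a[-i - 1] != b[i]:
--             count += sum(a != b for a, b in zip(a[-i - 1], b[i]))
--             if count > 1:
--                 return False
--     return count == 1
--
-- def solve(block):
--     lines = block.split("\n")
--     for j in range(2):
--         for i in range(1, len(lines)):
--             count = sum(a != b for a, b in zip(lines[i], lines[i - 1]))
--             if count <= 1 and verify(lines[:i], lines[i:]):
--                 return i if j == 1 else i * 100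
--         lines = list(zip(*lines))
-- ===== SOURCE B (Python) =====
-- def solve(block):
--     lines = block.split("\n")
--     grids = [lines, [list(t) for t in zip(*lines)]]
--     for j in range(2):
--         grid = grids[j]
--         n = len(grid)
--         D = [[sum(x != y for x, y in zip(r, s)) for s in grid] for r in grid]
--         for i in range(1, n):
--             total = sum(D[i - 1 - k][i + k] for k in range(min(i, n - i)))
--             if total == 1:
--                 return i * 100 if j == 0 else i
-- ===== Notes on version B (the rewrite author's own statement) =====
-- stated objective: alternative
-- what changed: B replaces A's adjacent-row prune plus reflect-and-verify early-exit scan with a precomputed pairwise hamming-distance table per orientation, then finds the first split whose reflected-pair distance sum equals exactly 1.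
import Mathlib
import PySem

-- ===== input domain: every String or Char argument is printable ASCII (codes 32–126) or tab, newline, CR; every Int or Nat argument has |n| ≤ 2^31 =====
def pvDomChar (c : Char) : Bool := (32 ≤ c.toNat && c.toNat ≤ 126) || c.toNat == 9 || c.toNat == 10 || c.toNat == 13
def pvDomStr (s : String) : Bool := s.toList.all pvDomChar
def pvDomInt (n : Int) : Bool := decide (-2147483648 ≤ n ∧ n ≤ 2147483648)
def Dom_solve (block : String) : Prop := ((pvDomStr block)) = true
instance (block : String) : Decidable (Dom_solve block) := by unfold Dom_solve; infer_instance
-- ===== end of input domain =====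

-- B replaces A's adjacent-prune-then-verify scan by a precomputed pairwise hamming-distance
-- table summed over reflected pairs (a different decomposition; no speed claim).

-- ===== PORT A =====
-- sum(a != b for a, b in zip(x, y))
def pyMismatch (r s : List Char) : Int :=
  (List.zip r s).foldl (fun acc p => acc + (if p.1 ≠ p.2 then (1 : Int) else 0)) 0

-- the loop of verify, fuel = number of remaining iterations (= min(len a, len b) at the call);
-- a[-i-1] ported as a.getD (a.length-1-i) [] (exact: i < len a inside the loop)
def verifyGo (a b : List (List Char)) : Nat → Nat → Int → Bool
  | 0, _, count => count == 1
  | fuel + 1, i, count =>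
    let ai := a.getD (a.length - 1 - i) []
    let bi := b.getD i []
    if ai ≠ bi then
      let count' := count + pyMismatch ai bi
      if count' > 1 then false else verifyGo a b fuel (i + 1) count'
    else verifyGo a b fuel (i + 1) count

def verify (a b : List (List Char)) : Bool :=
  verifyGo a b (min a.length b.length) 0 0

-- hand port of Python's list(zip(*lines)): truncates to the shortest row, [] for no rows (exact)
def pyZipT (g : List (List Char)) : List (List Char) :=
  match g with
  | [] => []
  | r0 :: rest =>
    let m := rest.foldl (fun acc r => min acc r.length) r0.length
    (List.range m).map (fun k => g.map (fun r => r.getD k ' '))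

-- the inner 'for i in range(1, len(lines))' loop (fuel = len(lines) - 1 iterations), j = pass
def solveGo (lines : List (List Char)) (j : Nat) : Nat → Nat → Option Int
  | 0, _ => none
  | fuel + 1, i =>
    let count := pyMismatch (lines.getD i []) (lines.getD (i - 1) [])
    if decide (count ≤ 1) && verify (lines.take i) (lines.drop i) then
      some (if j == 1 then (i : Int) else (i : Int) * 100)
    else solveGo lines j fuel (i + 1)

def solve (block : String) : Option Int :=
  let lines := PySem.Chars.splitOn block.toList ['\n']
  match solveGo lines 0 (lines.length - 1) 1 with
  | some v => some v
  | none => solveGo (pyZipT lines) 1 ((pyZipT lines).length - 1) 1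

-- ===== PORT B =====
-- sum(x != y for x, y in zip(r, s))
def hamming (r s : List Char) : Int :=
  (List.zip r s).foldl (fun acc p => acc + (if p.1 ≠ p.2 then (1 : Int) else 0)) 0

-- D = [[hamming of every pair of rows]]
def hamTable (g : List (List Char)) : List (List Int) :=
  g.map (fun r => g.map (fun s => hamming r s))

-- hand port of [list(t) for t in zip(*lines)] (truncates to the shortest row, [] for no rows; exact)
def altTranspose (g : List (List Char)) : List (List Char) :=
  match g with
  | [] => []
  | r0 :: rest =>
    let m := rest.foldl (fun acc r => min acc r.length) r0.length
    (List.range m).map (fun k => g.map (fun r => r.getD k ' '))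

-- the inner 'for i in range(1, n)' loop of B (fuel = n - 1 iterations): sum reflected pairs out of the table
def altScan (D : List (List Int)) (n : Nat) (j : Nat) : Nat → Nat → Option Int
  | 0, _ => none
  | fuel + 1, i =>
    let total := ((List.range (min i (n - i))).map
      (fun k => ((D.getD (i - 1 - k) []).getD (i + k) (0 : Int)))).sum
    if total == 1 then some (if j == 0 then (i : Int) * 100 else (i : Int))
    else altScan D n j fuel (i + 1)

def solve_alt (block : String) : Option Int :=
  let lines := PySem.Chars.splitOn block.toList ['\n']
  let g0 := lines
  let g1 := altTranspose lines
  match altScan (hamTable g0) g0.length 0 (g0.length - 1) 1 with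
  | some v => some v
  | none => altScan (hamTable g1) g1.length 1 (g1.length - 1) 1

-- ===== PRECONDITION & SPEC =====
def Spec_solve (block : String) (out : Option Int) : Prop := out = solve_alt block
instance (block : String) (out : Option Int) : Decidable (Spec_solve block out) := by unfold Spec_solve; infer_instance

-- ===== CLAIM (what is proved, stated in full; the proofs are below) =====
def Claim_equal_solve : Prop := ∀ (block : String), Dom_solve block → Spec_solve block (solve block)

-- ===== LEMMAS AND PROOFS =====


theorem foldl_count (l : List (Char × Char)) (c : Int) :
    l.foldl (fun acc p => acc + (if p.1 ≠ p.2 then (1 : Int) else 0)) c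
      = c + (l.countP (fun p => p.1 != p.2) : Int) := by
  induction l generalizing c with
  | nil => simp
  | cons x xs ih =>
    simp only [List.foldl_cons, List.countP_cons, ih]
    by_cases h : x.1 = x.2 <;> simp [h] <;> push_cast <;> ring

theorem pyMismatch_eq_countP (r s : List Char) :
    pyMismatch r s = ((List.zip r s).countP (fun p => p.1 != p.2) : Int) := by
  unfold pyMismatch
  rw [foldl_count]
  ring

theorem pyMismatch_nonneg (r s : List Char) : 0 ≤ pyMismatch r s := by
  rw [pyMismatch_eq_countP]; positivity

theorem pyMismatch_comm (r s : List Char) : pyMismatch r s = pyMismatch s r := by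
  rw [pyMismatch_eq_countP, pyMismatch_eq_countP, ← List.zip_swap r s, List.countP_map]
  congr 1
  apply List.countP_congr
  intro p _
  simp [Prod.swap, Function.comp, bne, BEq.beq]
  exact ⟨fun h h' => h h'.symm, fun h h' => h h'.symm⟩

theorem mem_zip_self {r : List Char} {p : Char × Char} (h : p ∈ r.zip r) : p.1 = p.2 := by
  induction r with
  | nil => simp at h
  | cons x xs ih =>
    simp only [List.zip_cons_cons, List.mem_cons] at h
    rcases h with h | h
    · subst h; rfl
    · exact ih h

theorem pyMismatch_self (r : List Char) : pyMismatch r r = 0 := by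
  rw [pyMismatch_eq_countP]
  norm_num
  intro a b h
  exact mem_zip_self (p := (a, b)) h

-- sum of reflected-pair mismatches from position k on (A's verify accumulates exactly this)
def Sfrom (a b : List (List Char)) (k : Nat) : Int :=
  if h : k < min a.length b.length then
    pyMismatch (a.getD (a.length - 1 - k) []) (b.getD k []) + Sfrom a b (k + 1)
  else 0
termination_by min a.length b.length - k


theorem Sfrom_nonneg (a b : List (List Char)) (k : Nat) : 0 ≤ Sfrom a b k := by
  unfold Sfrom
  split
  · have := pyMismatch_nonneg (a.getD (a.length - 1 - k) []) (b.getD k [])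
    have := Sfrom_nonneg a b (k + 1)
    omega
  · omega
termination_by min a.length b.length - k

theorem verifyGo_eq (a b : List (List Char)) (fuel : Nat) :
    ∀ (k : Nat) (c : Int), fuel = min a.length b.length - k →
      verifyGo a b fuel k c = decide (c + Sfrom a b k = 1) := by
  induction fuel with
  | zero =>
    intro k c hf
    have h : ¬ k < min a.length b.length := by omega
    rw [Sfrom, dif_neg h]
    show (c == 1) = decide (c + 0 = 1)
    by_cases h' : c = 1 <;> simp [h']
  | succ fuel ih =>
    intro k c hf
    have h : k < min a.length b.length := by omega
    show (if a.getD (a.length - 1 - k) [] ≠ b.getD k [] then _ else _) = _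
    rw [Sfrom, dif_pos h]
    set ai := a.getD (a.length - 1 - k) [] with hai
    set bi := b.getD k [] with hbi
    by_cases hne : ai = bi
    · rw [if_neg (by simp [hne]), ih (k + 1) c (by omega), hne, pyMismatch_self]
      simp
    · rw [if_pos hne]
      by_cases hgt : c + pyMismatch ai bi > 1
      · rw [if_pos hgt]
        have := Sfrom_nonneg a b (k + 1)
        have : c + (pyMismatch ai bi + Sfrom a b (k + 1)) ≠ 1 := by omega
        simp [this]
      · rw [if_neg hgt, ih (k + 1) _ (by omega)]
        rw [add_assoc]

theorem Sfrom_eq_sum (a b : List (List Char)) (k : Nat) :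
    Sfrom a b k = ((List.range' k (min a.length b.length - k)).map
      (fun t => pyMismatch (a.getD (a.length - 1 - t) []) (b.getD t []))).sum := by
  unfold Sfrom
  split
  case isTrue h =>
    rw [Sfrom_eq_sum a b (k + 1)]
    have hm : min a.length b.length - k = (min a.length b.length - (k + 1)) + 1 := by omega
    rw [hm, List.range'_succ]
    simp
  case isFalse h =>
    have : min a.length b.length - k = 0 := by omega
    simp [this]
termination_by min a.length b.length - k


theorem hamTable_getD (g : List (List Char)) (x y : Nat) (hx : x < g.length) (hy : y < g.length) :
    ((hamTable g).getD x []).getD y (0 : Int) = pyMismatch (g.getD x []) (g.getD y []) := by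
  simp only [List.getD_eq_getElem?_getD, hamTable, List.getElem?_map,
    List.getElem?_eq_getElem hx, List.getElem?_eq_getElem hy, Option.map_some, Option.getD_some]
  rfl

theorem range_sum_head (f : Nat → Int) (m : Nat) (hm : 0 < m) :
    ((List.range m).map f).sum = f 0 + ((List.range' 1 (m - 1)).map f).sum := by
  obtain ⟨m', rfl⟩ : ∃ m', m = m' + 1 := ⟨m - 1, by omega⟩
  rw [List.range_eq_range', List.range'_succ]
  simp

theorem cond_eq (g : List (List Char)) (i : Nat) (h1 : 1 ≤ i) (h2 : i < g.length) :
    (decide (pyMismatch (g.getD i []) (g.getD (i - 1) []) ≤ 1) &&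
      verify (g.take i) (g.drop i))
    = (((List.range (min i (g.length - i))).map
        (fun k => (((hamTable g).getD (i - 1 - k) []).getD (i + k) (0 : Int)))).sum == 1) := by
  have la : (g.take i).length = i := by rw [List.length_take]; omega
  have lb : (g.drop i).length = g.length - i := List.length_drop
  have hmin : min (g.take i).length (g.drop i).length = min i (g.length - i) := by rw [la, lb]
  -- common form of each summand
  have hterm : ∀ t, t < min i (g.length - i) →
      pyMismatch ((g.take i).getD ((g.take i).length - 1 - t) []) ((g.drop i).getD t [])
        = ((hamTable g).getD (i - 1 - t) []).getD (i + t) (0 : Int) := by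
    intro t ht
    have ht1 : i - 1 - t < i := by omega
    have ht2 : i + t < g.length := by omega
    rw [hamTable_getD g _ _ (by omega) ht2]
    congr 1
    · rw [la, List.getD_eq_getElem?_getD, List.getElem?_take, if_pos ht1,
          List.getD_eq_getElem?_getD]
    · rw [List.getD_eq_getElem?_getD, List.getElem?_drop, List.getD_eq_getElem?_getD]
  have hver : verify (g.take i) (g.drop i)
      = decide ((((List.range (min i (g.length - i))).map
          (fun k => (((hamTable g).getD (i - 1 - k) []).getD (i + k) (0 : Int)))).sum) = 1) := by
    rw [verify, verifyGo_eq (g.take i) (g.drop i) _ 0 0 (by omega), Sfrom_eq_sum, zero_add, hmin, Nat.sub_zero,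
        ← List.range_eq_range']
    congr 2
    exact congrArg List.sum
      (List.map_congr_left fun t ht => hterm t (List.mem_range.1 ht))
  rw [hver]
  set S := ((List.range (min i (g.length - i))).map
      (fun k => (((hamTable g).getD (i - 1 - k) []).getD (i + k) (0 : Int)))).sum with hS
  have hbeq : (S == 1) = decide (S = 1) := by
    by_cases h : S = 1 <;> simp [h]
  rw [hbeq]
  by_cases hs : S = 1
  · -- prune passes: first summand ≤ total = 1
    have hm : min i (g.length - i) = (min i (g.length - i) - 1) + 1 := by omega
    have hsplit : S = (((hamTable g).getD (i - 1) []).getD i (0 : Int))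
        + ((List.range' 1 (min i (g.length - i) - 1)).map
          (fun k => (((hamTable g).getD (i - 1 - k) []).getD (i + k) (0 : Int)))).sum := by
      rw [hS, range_sum_head _ _ (by omega)]
      norm_num
    have hrest : 0 ≤ ((List.range' 1 (min i (g.length - i) - 1)).map
          (fun k => (((hamTable g).getD (i - 1 - k) []).getD (i + k) (0 : Int)))).sum := by
      apply List.sum_nonneg
      intro x hx
      obtain ⟨t, htm, rfl⟩ := List.mem_map.1 hx
      have : t < min i (g.length - i) := by
        have := List.mem_range'.1 htm
        omega
      rw [← hterm t this]
      exact pyMismatch_nonneg _ _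
    have hfirst : ((hamTable g).getD (i - 1) []).getD i (0 : Int)
        = pyMismatch (g.getD (i - 1) []) (g.getD i []) := hamTable_getD g _ _ (by omega) h2
    have hle : pyMismatch (g.getD i []) (g.getD (i - 1) []) ≤ 1 := by
      rw [pyMismatch_comm]
      rw [hs] at hsplit
      rw [← hfirst]
      omega
    have ht : decide (S = 1) = true := by simp [hs]
    rw [ht, Bool.and_true]
    exact decide_eq_true hle
  · have hf : decide (S = 1) = false := by simp [hs]
    rw [hf, Bool.and_false]

theorem loop_eq (g : List (List Char)) (j : Nat) (hj : j = 0 ∨ j = 1) (fuel : Nat) :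
    ∀ (i : Nat), 1 ≤ i → fuel = g.length - i →
      solveGo g j fuel i = altScan (hamTable g) g.length j fuel i := by
  induction fuel with
  | zero => intro i _ _; rfl
  | succ fuel ih =>
    intro i h1 hf
    have h : i < g.length := by omega
    show (if decide (pyMismatch (g.getD i []) (g.getD (i - 1) []) ≤ 1) &&
            verify (g.take i) (g.drop i) then _ else _) = _
    rw [cond_eq g i h1 h]
    show _ = (if _ == 1 then _ else altScan (hamTable g) g.length j fuel (i + 1))
    split
    · rcases hj with rfl | rfl <;> simp
    · exact ih (i + 1) (by omega) (by omega)

theorem transpose_same : altTranspose = pyZipT := rfl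

theorem top_eq (lines : List (List Char)) :
    (match solveGo lines 0 (lines.length - 1) 1 with
     | some v => some v
     | none => solveGo (pyZipT lines) 1 ((pyZipT lines).length - 1) 1)
    = (match altScan (hamTable lines) lines.length 0 (lines.length - 1) 1 with
       | some v => some v
       | none => altScan (hamTable (altTranspose lines)) (altTranspose lines).length 1
           ((altTranspose lines).length - 1) 1) := by
  rw [loop_eq lines 0 (Or.inl rfl) (lines.length - 1) 1 le_rfl rfl, transpose_same,
      loop_eq (pyZipT lines) 1 (Or.inr rfl) ((pyZipT lines).length - 1) 1 le_rfl rfl]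

-- ===== VERDICT (by name: the statement is the Claim_ definition above) =====
theorem solve_spec : Claim_equal_solve := by
  intro block _
  exact top_eq (PySem.Chars.splitOn block.toList ['\n'])
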